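-- pv_equiv track=rewrite | github.com/Noravee/neuroai_lite | evolution.py | nsga3_selection
-- ===== SOURCE A (Python) =====
-- def nsga3_selection(front: list[int],
--                     associations: list[int],
--                     n_selections: int
--                     ) -> list[int]:
--     """
--     Select individuals based on their association with reference points to
--     maintain diversity, prioritizing individuals associated with the least
--     populated reference points.
--
--     Parameters:
--         front (list[int]): List of indices representing individuals in the
--                            current front (subset of the population).
--         associations (list[int]): List where each element corresponds to a
--                                   reference point association for each
--                                   individual in `front`.
--         n_selections (int): Number of individuals to select from the `front`.
--
--     Returns:
--         list[int]: List of selected individual indices from `front`, chosen to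
--                    maximize diversity based on reference point associations.
--     """
--     # Count individuals associated with each reference point
--     reference_count = {assoc: 0 for assoc in set(associations)}
--     for assoc in associations:
--         reference_count[assoc] += 1
--
--     # Sort front indices by the association count of their reference point
--     sorted_front = sorted(
--         range(len(front)),
--         key=lambda i: reference_count[associations[i]]
--     )
--
--     # Select the required number of individuals by slicing the sorted list
--     selected_indices = [front[i] for i in sorted_front[:n_selections]]
--     return selected_indices
-- ===== SOURCE B (Python) =====
-- def nsga3_selection(front: list[int],
--                     associations: list[int],
--                     n_selections: int
--                     ) -> list[int]:
--     # Counting/bucket sort over association counts instead of a key-based comparison sort.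
--     counts = {}
--     for a in associations:
--         counts[a] = counts.get(a, 0) + 1
--     buckets = [[] for _ in range(len(associations) + 1)]
--     for x, a in zip(front, associations):
--         buckets[counts[a]].append(x)
--     selected = []
--     for b in buckets:
--         selected.extend(b)
--     return selected[:n_selections]
-- ===== Notes on version B (the rewrite author's own statement) =====
-- stated objective: alternative
-- what changed: Replaces sorting the index range by association-count key with a stable counting/bucket sort: individuals are appended into per-count buckets (counts are integers in 1..len(associations)) which are concatenated in increasing count order, then sliced to n_selections.
import Mathlib
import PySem

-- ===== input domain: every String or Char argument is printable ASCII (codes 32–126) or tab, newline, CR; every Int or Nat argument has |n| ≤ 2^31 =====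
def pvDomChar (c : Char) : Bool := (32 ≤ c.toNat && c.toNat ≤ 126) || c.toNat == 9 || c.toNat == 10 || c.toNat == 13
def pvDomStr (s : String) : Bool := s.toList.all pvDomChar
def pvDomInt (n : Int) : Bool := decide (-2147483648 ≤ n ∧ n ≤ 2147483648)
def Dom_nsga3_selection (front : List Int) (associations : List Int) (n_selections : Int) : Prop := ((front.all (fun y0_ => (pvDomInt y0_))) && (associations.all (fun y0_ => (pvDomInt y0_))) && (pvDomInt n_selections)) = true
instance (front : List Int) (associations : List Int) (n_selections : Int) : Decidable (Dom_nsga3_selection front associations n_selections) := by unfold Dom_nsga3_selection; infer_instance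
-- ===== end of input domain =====

-- B replaces A's key-based sort of the index range by a stable counting/bucket sort over the
-- integer association counts (objective: alternative algorithm).

-- ===== PORT A =====
-- Python A raises (IndexError on associations[i]) when len(front) > len(associations);
-- Pre_ excludes exactly those inputs, so the pyGetD defaults below are never consulted.
def nsga3_selection (front : List Int) (associations : List Int) (n_selections : Int) : List Int :=
  -- reference_count = {assoc: 0 for assoc in set(associations)}  (the dict is only looked up later)
  let rc0 : PySem.Dict Int Int :=
    (PySem.Set.ofList associations).foldl (fun d assoc => d.insert assoc 0) PySem.Dict.empty
  -- for assoc in associations: reference_count[assoc] += 1  (the key is always present)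
  let reference_count : PySem.Dict Int Int :=
    associations.foldl (fun d assoc => d.insert assoc (d.getD assoc 0 + 1)) rc0
  -- sorted(range(len(front)), key=lambda i: reference_count[associations[i]])
  let sorted_front : List Int :=
    PySem.List.sorted (PySem.List.pyRange 0 (front.length : Int))
      (fun i => reference_count.getD (PySem.List.pyGetD associations i 0) 0)
  -- [front[i] for i in sorted_front[:n_selections]]
  (PySem.List.slice sorted_front none (some n_selections)).map
    (fun i => PySem.List.pyGetD front i 0)

-- ===== PORT B =====
def nsga3_selection_alt (front : List Int) (associations : List Int) (n_selections : Int) : List Int :=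
  -- counts[a] = counts.get(a, 0) + 1
  let counts : PySem.Dict Int Int :=
    associations.foldl (fun d a => d.insert a (d.getD a 0 + 1)) PySem.Dict.empty
  -- buckets = [[] for _ in range(len(associations) + 1)]; buckets[counts[a]].append(x)
  -- (the index counts[a] lies in 1..len(associations), hence always in range)
  let buckets : List (List Int) :=
    (front.zip associations).foldl
      (fun bs p => bs.set (counts.getD p.2 0).toNat
                          (bs.getD (counts.getD p.2 0).toNat [] ++ [p.1]))
      (List.replicate (associations.length + 1) [])
  -- selected = []; for b in buckets: selected.extend(b); return selected[:n_selections]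
  let selected : List Int := buckets.foldl (fun acc b => acc ++ b) []
  PySem.List.slice selected none (some n_selections)

-- ===== PRECONDITION & SPEC =====
-- Pre_ excludes exactly the inputs where Python A raises an IndexError
-- (an individual in front with no corresponding entry in associations).
def Pre_nsga3_selection (front : List Int) (associations : List Int) (n_selections : Int) : Prop :=
  front.length ≤ associations.length
instance (front : List Int) (associations : List Int) (n_selections : Int) : Decidable (Pre_nsga3_selection front associations n_selections) := by unfold Pre_nsga3_selection; infer_instance

def pvWitness_nsga3_selection : List Int × List Int × Int := ([10, 20, 30], [1, 1, 2], 2)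

def Spec_nsga3_selection (front : List Int) (associations : List Int) (n_selections : Int) (out : List Int) : Prop := out = nsga3_selection_alt front associations n_selections
instance (front : List Int) (associations : List Int) (n_selections : Int) (out : List Int) : Decidable (Spec_nsga3_selection front associations n_selections out) := by unfold Spec_nsga3_selection; infer_instance

-- ===== CLAIM (what is proved, stated in full; the proofs are below) =====
def Claim_equal_nsga3_selection : Prop := ∀ (front : List Int) (associations : List Int) (n_selections : Int), Dom_nsga3_selection front associations n_selections → Pre_nsga3_selection front associations n_selections → Spec_nsga3_selection front associations n_selections (nsga3_selection front associations n_selections)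

-- ===== LEMMAS AND PROOFS =====

-- The insert-based counting loop computes list counts (on top of whatever d already holds).
theorem pv_fold_insert_count (xs : List Int) (d : PySem.Dict Int Int) (a : Int) :
    (xs.foldl (fun d x => d.insert x (d.getD x 0 + 1)) d).getD a 0
      = d.getD a 0 + (xs.count a : Int) := by
  induction xs generalizing d with
  | nil => simp
  | cons x t ih =>
      simp only [List.foldl_cons, ih, PySem.Dict.getD_insert, List.count_cons]
      by_cases h : a = x
      · subst h; simp; ring
      · simp [h, Ne.symm h]

-- A's zero-initialisation loop leaves every getD-with-default-0 at 0.
theorem pv_fold_zero (xs : List Int) (d : PySem.Dict Int Int) (h : ∀ k, d.getD k 0 = 0) (a : Int) :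
    (xs.foldl (fun d x => d.insert x (0 : Int)) d).getD a 0 = 0 := by
  induction xs generalizing d with
  | nil => exact h a
  | cons x t ih =>
      refine ih _ (fun k => ?_)
      rw [PySem.Dict.getD_insert]
      by_cases hk : k = x <;> simp [hk, h]

theorem pv_insertBy_append_not {α : Type} (before : α → α → Bool) (x : α) (l1 l2 : List α)
    (h : ∀ y ∈ l1, before x y = false) :
    PySem.List.insertBy before x (l1 ++ l2) = l1 ++ PySem.List.insertBy before x l2 := by
  induction l1 with
  | nil => simp
  | cons y t ih =>
      have hy : before x y = false := h y (by simp)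
      simp [PySem.List.insertBy, hy, ih (fun z hz => h z (by simp [hz]))]

theorem pv_insertBy_all_before {α : Type} (before : α → α → Bool) (x : α) (l : List α)
    (h : ∀ y ∈ l, before x y = true) :
    PySem.List.insertBy before x l = x :: l := by
  cases l with
  | nil => rfl
  | cons y t => simp [PySem.List.insertBy, h y (by simp)]

-- A stable sort whose keys are integers in [0, m] is the concatenation of its key-buckets.
theorem pv_sorted_eq_buckets {α : Type} (xs : List α) (key : α → Int) (m : Nat)
    (h : ∀ x ∈ xs, 0 ≤ key x ∧ key x ≤ (m : Int)) :
    PySem.List.sorted xs key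
      = (List.range (m + 1)).flatMap
          (fun k : Nat => xs.filter (fun x => decide (key x = (k : Int)))) := by
  induction xs using List.reverseRecOn with
  | nil => simp [PySem.List.sorted_eq_foldl_insertBy]
  | append_singleton p x ih =>
      have hp : ∀ y ∈ p, 0 ≤ key y ∧ key y ≤ (m : Int) :=
        fun y hy => h y (by simp [hy])
      have hx : 0 ≤ key x ∧ key x ≤ (m : Int) := h x (by simp)
      have ihp := ih hp
      rw [PySem.List.sorted_eq_foldl_insertBy] at ihp ⊢
      rw [List.foldl_append, List.foldl_cons, List.foldl_nil, ihp]
      set k0 : Nat := (key x).toNat with hk0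
      have hxk0 : key x = (k0 : Int) := by omega
      have hk0m : k0 ≤ m := by omega
      have hsplit : m + 1 = (k0 + 1) + (m - k0) := by omega
      rw [hsplit, List.range_add, List.range_succ]
      simp only [List.flatMap_append, List.flatMap_cons, List.flatMap_nil, List.flatMap_map,
        List.append_nil]
      rw [List.append_assoc]
      rw [pv_insertBy_append_not _ x _ _ (by
        intro y hy
        obtain ⟨k, hk, hyf⟩ := List.mem_flatMap.mp hy
        have hkey : key y = (k : Int) := of_decide_eq_true (List.mem_filter.mp hyf).2
        have hklt : k < k0 := List.mem_range.mp hk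
        simp only [decide_eq_false_iff_not, not_lt, hxk0, hkey]
        exact_mod_cast Nat.le_of_lt hklt)]
      rw [pv_insertBy_append_not _ x _ _ (by
        intro y hy
        have hkey : key y = (k0 : Int) := of_decide_eq_true (List.mem_filter.mp hy).2
        simp [hkey, hxk0])]
      rw [pv_insertBy_all_before _ x _ (by
        intro y hy
        obtain ⟨k, hk, hyf⟩ := List.mem_flatMap.mp hy
        have hkey : key y = ((k0 + 1 + k : Nat) : Int) := of_decide_eq_true (List.mem_filter.mp hyf).2
        simp only [decide_eq_true_eq, hxk0, hkey]
        push_cast; omega)]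
      have e1 : (List.range k0).flatMap
            (fun k : Nat => (p ++ [x]).filter (fun y => decide (key y = (k : Int))))
          = (List.range k0).flatMap
            (fun k : Nat => p.filter (fun y => decide (key y = (k : Int)))) := by
        refine List.flatMap_congr (fun k hk => ?_)
        have hklt : k < k0 := List.mem_range.mp hk
        have hne : ¬ (key x = (k : Int)) := by omega
        rw [List.filter_append]
        simp [hne]
      have e2 : (List.range (m - k0)).flatMap
            (fun k : Nat => (p ++ [x]).filter (fun y => decide (key y = ((k0 + 1 + k : Nat) : Int))))
          = (List.range (m - k0)).flatMap
            (fun k : Nat => p.filter (fun y => decide (key y = ((k0 + 1 + k : Nat) : Int)))) := by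
        refine List.flatMap_congr (fun k hk => ?_)
        have hne : ¬ (key x = (k0 : Int) + 1 + (k : Int)) := by omega
        rw [List.filter_append]
        simp [hne]
      have e3 : (p ++ [x]).filter (fun y => decide (key y = (k0 : Int)))
          = p.filter (fun y => decide (key y = (k0 : Int))) ++ [x] := by
        rw [List.filter_append]
        simp [hxk0]
      rw [e1, e2, e3]
      simp

-- Elementwise description of B's bucket-filling fold.
theorem pv_buckets_fold (l : List (Int × Int)) (key : Int → Int) (bs : List (List Int))
    (h : ∀ p ∈ l, 0 ≤ key p.2 ∧ (key p.2).toNat < bs.length) (j : Nat) (hj : j < bs.length) :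
    (l.foldl (fun bs p => bs.set (key p.2).toNat (bs.getD (key p.2).toNat [] ++ [p.1])) bs).getD j []
      = bs.getD j [] ++ (l.filter (fun p => decide (key p.2 = (j : Int)))).map Prod.fst := by
  induction l generalizing bs with
  | nil => simp
  | cons q t ih =>
      obtain ⟨hq0, hqlt⟩ := h q (by simp)
      have hlen : (bs.set (key q.2).toNat (bs.getD (key q.2).toNat [] ++ [q.1])).length = bs.length := by
        simp
      rw [List.foldl_cons, ih _ (by rw [hlen]; exact fun p hp => h p (by simp [hp])) (by rw [hlen]; exact hj)]
      rw [List.filter_cons]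
      by_cases hqj : key q.2 = (j : Int)
      · have hqn : (key q.2).toNat = j := by omega
        simp [List.getD_eq_getElem?_getD, hj, hqj]
      · have hne : (key q.2).toNat ≠ j := by omega
        simp [List.getD_eq_getElem?_getD, hne, hqj]

-- B's bucket-filling fold keeps the list of buckets the same length.
theorem pv_buckets_fold_length (l : List (Int × Int)) (key : Int → Int) (bs : List (List Int)) :
    (l.foldl (fun bs p => bs.set (key p.2).toNat (bs.getD (key p.2).toNat [] ++ [p.1])) bs).length
      = bs.length := by
  induction l generalizing bs with
  | nil => rfl
  | cons q t ih => rw [List.foldl_cons, ih]; simp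

theorem pv_flatten_eq_flatMap_range {α : Type} (l : List (List α)) :
    l.flatten = (List.range l.length).flatMap (fun j => l.getD j []) := by
  induction l with
  | nil => simp
  | cons b t ih =>
      simp [List.range_succ_eq_map, List.flatMap_cons, List.flatMap_map, ih]

-- selecting from front by filtered range indices = filtering the zip on the association value
theorem pv_range_filter_map_zip (f g : List Int) (P : Int → Bool) (h : f.length ≤ g.length) :
    ((List.range f.length).filter (fun i => P (g.getD i 0))).map (fun i => f.getD i 0)
      = ((f.zip g).filter (fun p => P p.2)).map Prod.fst := by
  induction f generalizing g with
  | nil => simp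
  | cons x t ih =>
      cases g with
      | nil => simp at h
      | cons a g' =>
          have ih' := ih g' (by simpa using h)
          simp only [List.length_cons, List.range_succ_eq_map, List.filter_cons,
            List.zip_cons_cons, List.getD_cons_zero, List.filter_map, Function.comp_def,
            Nat.succ_eq_add_one]
          by_cases hP : P a <;>
            simp only [hP, if_true, Bool.false_eq_true, if_false, List.map_cons, List.map_map,
              Function.comp_def, List.getD_cons_zero, List.getD_cons_succ] <;>
            rw [ih']

-- ===== VERDICT (by name: the statement is the Claim_ definition above) =====
theorem nsga3_selection_spec : Claim_equal_nsga3_selection := by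
  intro front associations n_selections _hdom hpre
  unfold Spec_nsga3_selection nsga3_selection nsga3_selection_alt
  have hpre' : front.length ≤ associations.length := hpre
  set m : Nat := associations.length with hm
  -- both dicts answer the association count
  have hempty : ∀ k : Int, (PySem.Dict.empty : PySem.Dict Int Int).getD k 0 = 0 := by
    intro k; simp [PySem.Dict.empty, PySem.Dict.getD, PySem.Dict.get?]
  have hzero : ∀ k : Int,
      ((PySem.Set.ofList associations).foldl (fun d assoc => d.insert assoc (0 : Int))
        PySem.Dict.empty).getD k 0 = 0 :=
    fun k => pv_fold_zero _ _ hempty k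
  have hrc : ∀ a : Int,
      (associations.foldl (fun d assoc => d.insert assoc (d.getD assoc 0 + 1))
        ((PySem.Set.ofList associations).foldl (fun d assoc => d.insert assoc (0 : Int))
          PySem.Dict.empty)).getD a 0 = (associations.count a : Int) := by
    intro a; rw [pv_fold_insert_count, hzero]; ring
  have hcounts : ∀ a : Int,
      (associations.foldl (fun d a => d.insert a (d.getD a 0 + 1))
        PySem.Dict.empty).getD a 0 = (associations.count a : Int) := by
    intro a; rw [pv_fold_insert_count, hempty]; ring
  simp only [hrc, hcounts]
  -- A's sort as key-buckets
  rw [show ((front.length : Int)) = ((front.length : Nat) : Int) from rfl,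
    PySem.List.pyRange_zero_natCast]
  rw [pv_sorted_eq_buckets _ _ m (by
    intro x hx
    obtain ⟨j, _hj, rfl⟩ := List.mem_map.mp hx
    constructor
    · exact_mod_cast Nat.zero_le _
    · exact_mod_cast List.count_le_length)]
  -- move A's final map inside the slice and into each bucket
  rw [show ∀ (S : List Int) (F : Int → Int),
        (PySem.List.slice S none (some n_selections)).map F
          = PySem.List.slice (S.map F) none (some n_selections) from
    fun S F => by simp [PySem.List.slice]]
  rw [List.map_flatMap]
  -- B's buckets, elementwise
  rw [show (fun acc b => acc ++ b : List Int → List Int → List Int) = (fun acc b => acc ++ b) from rfl]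
  rw [PySem.List.foldl_append_eq_flatten, List.nil_append, pv_flatten_eq_flatMap_range,
    pv_buckets_fold_length (key := fun z => ((associations.count z : Nat) : Int)),
    List.length_replicate]
  congr 1
  refine List.flatMap_congr (fun k _hk => ?_)
  -- B's bucket k
  rw [pv_buckets_fold _ (fun z => ((associations.count z : Nat) : Int)) _ (by
      intro p _hp
      constructor
      · simp
      · simp only [Int.toNat_natCast, List.length_replicate]
        exact Nat.lt_succ_of_le List.count_le_length)
    k (by simpa using List.mem_range.mp _hk)]
  rw [show (List.replicate (m + 1) ([] : List Int)).getD k [] = [] from by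
    rw [List.getD_eq_getElem?_getD]; simp [List.mem_range.mp _hk], List.nil_append]
  -- A's bucket k
  rw [List.filter_map, List.map_map]
  have hcast : ∀ j : Nat, PySem.List.pyGetD associations ((j : Nat) : Int) 0 = associations.getD j 0 :=
    fun j => PySem.List.pyGetD_natCast _ _ _
  calc ((List.range front.length).filter
          (fun j : Nat => decide (((associations.count (PySem.List.pyGetD associations ((j : Nat) : Int) 0) : Nat) : Int) = (k : Int)))).map
          ((fun i => PySem.List.pyGetD front i 0) ∘ (fun k : Nat => (k : Int)))
      = ((List.range front.length).filter
          (fun j : Nat => (fun z => decide (((associations.count z : Nat) : Int) = (k : Int))) (associations.getD j 0))).map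
          (fun j : Nat => front.getD j 0) := by
        refine congrArg₂ _ (funext fun j => PySem.List.pyGetD_natCast _ _ _) ?_
        refine List.filter_congr (fun j _ => ?_)
        simp [hcast]
    _ = ((front.zip associations).filter
          (fun p => decide (((associations.count p.2 : Nat) : Int) = (k : Int)))).map Prod.fst :=
        pv_range_filter_map_zip front associations
          (fun z => decide (((associations.count z : Nat) : Int) = (k : Int))) hpre'
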